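-- pv_equiv track=rewrite | github.com/roa9618/algorithm-practice | 프로그래머스/0/120904. 숫자 찾기/숫자 찾기.py | solution
-- ===== SOURCE A (Python) =====
-- def solution(num, k):
--     arr = []
--     answer = -1
--
--     for i in str(num) :
--         arr.append(int(i))
--
--     if k in arr :
--         answer = arr.index(k) + 1
--
--     return answer
-- ===== SOURCE B (Python) =====
-- def solution(num, k):
--     # Arithmetic digit scan: peel digits with divmod (little-endian), remember the
--     # position (counted from the right) of the last match seen, i.e. the leftmost
--     # digit equal to k; convert to a 1-based position from the left at the end.
--     total = 0
--     best = -1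
--     n = num
--     while True:
--         n, d = divmod(n, 10)
--         total += 1
--         if d == k:
--             best = total
--         if n == 0:
--             break
--     return -1 if best == -1 else total - best + 1
-- ===== Notes on version B (the rewrite author's own statement) =====
-- stated objective: alternative
-- what changed: B never builds str(num) or a digit list: it peels digits arithmetically with divmod (right to left), keeps the position of the last match seen (= leftmost digit equal to k) and converts it to a 1-based position from the left, replacing A's str conversion + list build + membership test + .index lookup.
import Mathlib
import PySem

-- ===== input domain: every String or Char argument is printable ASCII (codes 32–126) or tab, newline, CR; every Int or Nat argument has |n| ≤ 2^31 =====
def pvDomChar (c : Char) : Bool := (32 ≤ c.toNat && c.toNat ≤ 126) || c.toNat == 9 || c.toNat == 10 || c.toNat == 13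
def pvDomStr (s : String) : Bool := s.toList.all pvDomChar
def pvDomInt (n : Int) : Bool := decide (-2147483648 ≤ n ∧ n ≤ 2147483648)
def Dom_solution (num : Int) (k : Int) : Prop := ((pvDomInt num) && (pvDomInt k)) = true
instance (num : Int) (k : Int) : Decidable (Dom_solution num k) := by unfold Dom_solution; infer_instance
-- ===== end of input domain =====

-- B drops A's str(num) + digit-list + membership + .index pipeline: it peels the digits
-- arithmetically with divmod, keeps the last-match position, and converts it at the end.

-- ===== PORT A =====
-- Python's int(c) for one character (A calls int on each 1-char string)
def pvDigit (c : Char) : Int := (PySem.Int.ofStr? (String.ofList [c])).getD 0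

def solution (num : Int) (k : Int) : Int :=
  let arr : List Int := (PySem.Int.toStr num).toList.foldl (fun acc c => acc ++ [pvDigit c]) []
  let answer : Int := -1
  if k ∈ arr then ((PySem.List.index? arr k).getD 0 : Int) + 1 else answer

-- ===== PORT B =====
-- the while-True loop of Source B; the fuel only makes it total (never exhausted for 0 ≤ n < fuel)
def solutionAltGo (k : Int) : Nat → Int → Int → Int → Int × Int
  | 0, _, total, best => (total, best)
  | fuel + 1, n, total, best =>
    let q := PySem.Int.floordiv n 10
    let d := PySem.Int.mod n 10
    let total := total + 1
    let best := if d = k then total else best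
    if q = 0 then (total, best) else solutionAltGo k fuel q total best

def solution_alt (num : Int) (k : Int) : Int :=
  let r := solutionAltGo k (num.toNat + 1) num 0 (-1)
  if r.2 = -1 then -1 else r.1 - r.2 + 1

-- ===== PRECONDITION & SPEC =====
-- Pre_ excludes num < 0: there str(num) starts with '-' and A's int('-') raises ValueError
-- (B's divmod loop does not terminate there either).
def Pre_solution (num : Int) (k : Int) : Prop := 0 ≤ num
instance (num : Int) (k : Int) : Decidable (Pre_solution num k) := by unfold Pre_solution; infer_instance
def pvWitness_solution : Int × Int := (123, 2)
def Spec_solution (num : Int) (k : Int) (out : Int) : Prop := out = solution_alt num k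
instance (num : Int) (k : Int) (out : Int) : Decidable (Spec_solution num k out) := by unfold Spec_solution; infer_instance

-- ===== CLAIM =====
def Claim_equal_solution : Prop := ∀ (num : Int) (k : Int), Dom_solution num k → Pre_solution num k → Spec_solution num k (solution num k)

-- ===== LEMMAS AND PROOFS =====

-- little-endian decimal digits of a Nat, at least one digit (matches str(0) = "0")
def pvDs (n : Nat) : List Nat :=
  n % 10 :: (if h : n / 10 = 0 then [] else pvDs (n / 10))
decreasing_by exact Nat.div_lt_self (Nat.pos_of_ne_zero (by omega)) (by norm_num)

theorem pvDs_lt (n : Nat) : ∀ d ∈ pvDs n, d < 10 := by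
  induction n using Nat.strong_induction_on with
  | _ n ih =>
    intro d hd
    rw [pvDs] at hd
    by_cases h : n / 10 = 0
    · simp [h] at hd; omega
    · simp only [dif_neg h, List.mem_cons] at hd
      rcases hd with h1 | h2
      · omega
      · exact ih (n / 10) (Nat.div_lt_self (by omega) (by norm_num)) d h2

theorem pvDigit_digitChar (d : Nat) (h : d < 10) : pvDigit (Nat.digitChar d) = (d : Int) := by
  interval_cases d <;> decide

theorem toDigitsCore_eq (n : Nat) : ∀ (f : Nat) (acc : List Char), n < f →
    Nat.toDigitsCore 10 f n acc = ((pvDs n).map Nat.digitChar).reverse ++ acc := by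
  induction n using Nat.strong_induction_on with
  | _ n ih =>
    intro f acc hf
    match f, hf with
    | f + 1, _ =>
      rw [Nat.toDigitsCore]
      by_cases h : n / 10 = 0
      · rw [pvDs]; simp [h]
      · rw [pvDs]
        simp only [h, if_false]
        rw [ih (n / 10) (Nat.div_lt_self (by omega) (by norm_num)) f
            (Nat.digitChar (n % 10) :: acc)
            (by have := Nat.div_lt_self (show 0 < n by omega) (show 1 < 10 by norm_num); omega)]
        simp

theorem map_pvDigit_toChars (n : Nat) :
    (PySem.Int.toChars (n : Int)).map pvDigit
      = ((pvDs n).map Int.ofNat).reverse := by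
  have h1 : PySem.Int.toChars (n : Int) = Nat.toDigits 10 n := by
    simp [PySem.Int.toChars]
  rw [h1, Nat.toDigits, toDigitsCore_eq n (n + 1) [] (by omega)]
  rw [List.append_nil, List.map_reverse, List.map_map]
  apply congrArg List.reverse
  simp only [Function.comp_def]
  exact List.map_congr_left fun d hd => pvDigit_digitChar d (pvDs_lt n d hd)

-- generic fold of Source B's loop body over a little-endian digit list
def pvLgo (k : Int) : List Int → Int → Int → Int × Int
  | [], total, best => (total, best)
  | d :: rest, total, best => pvLgo k rest (total + 1) (if d = k then total + 1 else best)

theorem solutionAltGo_eq_lgo (k : Int) (n : Nat) : ∀ (fuel : Nat) (total best : Int), n < fuel →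
    solutionAltGo k fuel (n : Int) total best
      = pvLgo k ((pvDs n).map Int.ofNat) total best := by
  induction n using Nat.strong_induction_on with
  | _ n ih =>
    intro fuel total best hf
    match fuel, hf with
    | fuel + 1, _ =>
      have hq : PySem.Int.floordiv (n : Int) 10 = ((n / 10 : Nat) : Int) := by
        simp only [PySem.Int.floordiv]
        exact (Int.ofNat_fdiv n 10).symm
      have hd : PySem.Int.mod (n : Int) 10 = ((n % 10 : Nat) : Int) := by
        simp only [PySem.Int.mod]
        rw [Int.fmod_eq_emod]; push_cast; rfl
      rw [solutionAltGo, pvDs]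
      simp only [hq, hd]
      by_cases h : n / 10 = 0
      · simp [h, pvLgo]
      · rw [if_neg (by intro hc; exact h (by exact_mod_cast hc))]
        simp only [dif_neg h]
        exact ih (n / 10) (Nat.div_lt_self (by omega) (by norm_num)) fuel _ _
          (by have := Nat.div_lt_self (show 0 < n by omega) (show 1 < 10 by norm_num); omega)

theorem foldl_append_map (l : List Char) (a : List Int) :
    l.foldl (fun acc c => acc ++ [pvDigit c]) a = a ++ l.map pvDigit := by
  induction l generalizing a with
  | nil => simp
  | cons c cs ih => simp [List.foldl, ih]

-- the heart: B's last-match accumulator vs the first index in the reversed list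
theorem lgo_spec (k : Int) : ∀ (L : List Int) (total best : Int),
    pvLgo k L total best
      = (total + L.length,
         if k ∈ L then total + (L.length : Int) - (List.idxOf k L.reverse : Int)
         else best) := by
  intro L
  induction L with
  | nil => intro total best; simp [pvLgo]
  | cons d rest ih =>
    intro total best
    rw [pvLgo, ih]
    simp only [Prod.mk.injEq, List.length_cons]
    by_cases hm : k ∈ rest
    · have hmr : k ∈ rest.reverse := by simpa using hm
      have hix : List.idxOf k ((d :: rest).reverse) = List.idxOf k rest.reverse := by
        rw [List.reverse_cons]; exact List.idxOf_append_of_mem hmr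
      rw [hix, if_pos hm, if_pos (by simp [hm])]
      exact ⟨by push_cast; ring, by push_cast; ring⟩
    · have hmr : ¬ k ∈ rest.reverse := by simpa using hm
      by_cases hdk : d = k
      · have hix : List.idxOf k ((d :: rest).reverse) = rest.length := by
          rw [List.reverse_cons, List.idxOf_append_of_notMem hmr]
          simp [hdk, List.length_reverse]
        rw [hix, if_neg hm, if_pos hdk, if_pos (by simp [hdk.symm])]
        exact ⟨by push_cast; ring, by push_cast; ring⟩
      · have hkd : ¬ k = d := fun e => hdk e.symm
        rw [if_neg hm, if_neg hdk, if_neg (by simp [hm, hkd])]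
        exact ⟨by push_cast; ring, rfl⟩

theorem idxOf?_eq_some_of_mem (a : Int) (l : List Int) (h : a ∈ l) :
    List.idxOf? a l = some (List.idxOf a l) := by
  induction l with
  | nil => simp at h
  | cons b t ih =>
    by_cases hb : a = b
    · simp [List.idxOf?_cons, hb]
    · have hba : b ≠ a := fun e => hb e.symm
      simp [List.idxOf?_cons, hb, hba] at *
      simpa using ih (by tauto)

-- A's answer computed from the reversed little-endian list vs B's final conversion
theorem combine (k : Int) (L : List Int) :
    (if k ∈ L.reverse then ((PySem.List.index? L.reverse k).getD 0 : Int) + 1 else -1)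
      = (let r := pvLgo k L 0 (-1); if r.2 = -1 then -1 else r.1 - r.2 + 1) := by
  rw [lgo_spec]
  by_cases hm : k ∈ L
  · have hmr : k ∈ L.reverse := by simpa using hm
    have hidx : List.idxOf k L.reverse < L.length := by
      have := List.idxOf_lt_length_of_mem hmr
      simpa using this
    have hcast : (List.idxOf k L.reverse : Int) < (L.length : Int) := by exact_mod_cast hidx
    rw [if_pos hmr]
    simp only [if_pos hm, zero_add]
    rw [if_neg (by omega)]
    rw [PySem.List.index?_eq_idxOf?, idxOf?_eq_some_of_mem k L.reverse hmr]
    simp only [Option.getD_some]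
    omega
  · have hmr : ¬ k ∈ L.reverse := by simpa using hm
    rw [if_neg hmr]
    simp [hm]

-- ===== VERDICT =====
theorem solution_spec : Claim_equal_solution := by
  intro num k _ hpre
  obtain ⟨n, rfl⟩ := Int.eq_ofNat_of_zero_le hpre
  unfold Spec_solution solution solution_alt
  have harr : (PySem.Int.toStr (n : Int)).toList.foldl (fun acc c => acc ++ [pvDigit c]) []
      = ((pvDs n).map Int.ofNat).reverse := by
    rw [foldl_append_map, List.nil_append, PySem.Int.toList_toStr, map_pvDigit_toChars]
  have htn : ((n : Int)).toNat + 1 = n + 1 := by simp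
  rw [harr, htn, solutionAltGo_eq_lgo k n (n + 1) 0 (-1) (by omega)]
  exact combine k ((pvDs n).map Int.ofNat)
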